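-- pv_equiv track=rewrite | github.com/Batuu13/Machine-Likes-It | test.py | get_occurance
-- ===== SOURCE A (Python) =====
-- def get_occurance(data):
--     words = {}
--     for sent in data:
--         for word in str(sent).split(" "):
--             count = words.get(word, -1)
--             if count == -1:
--                 words[word] = 1
--             else:
--                 words[word] += 1
--     return words
-- ===== SOURCE B (Python) =====
-- def get_occurance(data):
--     # Flatten all tokens first, then count: dedupe in first-occurrence order
--     # and look each word's total up with list.count.
--     tokens = []
--     for sent in data:
--         tokens.extend(str(sent).split(" "))
--     return {w: tokens.count(w) for w in dict.fromkeys(tokens)}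
-- ===== Notes on version B (the rewrite author's own statement) =====
-- stated objective: alternative
-- what changed: Replaces the nested loop with in-place dict updates and a -1 sentinel by a flatten pass followed by a dict comprehension over the deduplicated token list with list.count per distinct word.
import Mathlib
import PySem

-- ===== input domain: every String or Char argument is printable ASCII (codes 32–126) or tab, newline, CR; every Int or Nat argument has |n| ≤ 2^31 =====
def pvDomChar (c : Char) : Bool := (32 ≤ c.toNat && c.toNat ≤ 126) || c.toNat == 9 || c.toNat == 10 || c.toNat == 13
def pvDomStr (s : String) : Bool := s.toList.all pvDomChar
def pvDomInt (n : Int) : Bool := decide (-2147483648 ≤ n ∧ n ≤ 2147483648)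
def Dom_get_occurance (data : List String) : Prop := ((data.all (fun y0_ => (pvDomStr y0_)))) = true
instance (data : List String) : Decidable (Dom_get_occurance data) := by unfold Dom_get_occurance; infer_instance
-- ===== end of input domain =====

-- B replaces A's nested loop with in-place dict updates by a flatten pass plus a
-- count per distinct token (alternative decomposition, not claimed faster).

-- ===== PORT A =====
def get_occurance (data : List String) : List (String × Int) :=
  (data.foldl (fun words sent =>
      ((PySem.Str.split? sent " ").getD []).foldl (fun words word =>
        let count := PySem.Dict.getD words word (-1)
        if count == -1 then PySem.Dict.insert words word 1
        else PySem.Dict.insert words word (count + 1)) words)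
    PySem.Dict.empty).items

-- ===== PORT B =====
def get_occurance_alt (data : List String) : List (String × Int) :=
  let tokens := data.flatMap (fun sent => (PySem.Str.split? sent " ").getD [])
  (PySem.List.dedup tokens).map (fun w => (w, (tokens.count w : Int)))

-- ===== PRECONDITION & SPEC =====
def Spec_get_occurance (data : List String) (out : List (String × Int)) : Prop := out = get_occurance_alt data
instance (data : List String) (out : List (String × Int)) : Decidable (Spec_get_occurance data out) := by unfold Spec_get_occurance; infer_instance

-- ===== CLAIM (what is proved, stated in full; the proofs are below) =====
def Claim_equal_get_occurance : Prop := ∀ (data : List String), Dom_get_occurance data → Spec_get_occurance data (get_occurance data)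

-- ===== LEMMAS AND PROOFS =====

-- A's loop body, and the canonical counting step it is equivalent to on dicts with positive values.
def pvStepA (d : PySem.Dict String Int) (w : String) : PySem.Dict String Int :=
  let count := PySem.Dict.getD d w (-1)
  if count == -1 then PySem.Dict.insert d w 1 else PySem.Dict.insert d w (count + 1)

def pvStepC (d : PySem.Dict String Int) (w : String) : PySem.Dict String Int :=
  PySem.Dict.insert d w (PySem.Dict.getD d w 0 + 1)

-- nested loop over sentences = one loop over the flattened token list
lemma pv_foldl_flatMap {α β γ : Type} (g : α → List β) (f : γ → β → γ) :
    ∀ (l : List α) (init : γ),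
      l.foldl (fun acc x => (g x).foldl f acc) init = (l.flatMap g).foldl f init := by
  intro l
  induction l with
  | nil => intro init; rfl
  | cons s t ih =>
      intro init
      simp [List.flatMap_cons, List.foldl_append, ih]

lemma pv_invariant_step (d : PySem.Dict String Int) (w : String)
    (h : ∀ k v, d.get? k = some v → 1 ≤ v) :
    pvStepA d w = pvStepC d w ∧ (∀ k v, (pvStepA d w).get? k = some v → 1 ≤ v) := by
  unfold pvStepA pvStepC
  rcases hg : d.get? w with _ | v
  · have hd : PySem.Dict.getD d w (-1) = -1 := PySem.Dict.getD_of_get?_eq_none _ _ hg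
    have hd0 : PySem.Dict.getD d w 0 = 0 := PySem.Dict.getD_of_get?_eq_none _ _ hg
    simp only [hd, hd0]
    refine ⟨by norm_num, ?_⟩
    intro k v hk
    rw [if_pos (by decide)] at hk
    rw [PySem.Dict.get?_insert] at hk
    split_ifs at hk with hkw
    · simp_all
    · exact h k v hk
  · have hv : 1 ≤ v := h w v hg
    have hd : PySem.Dict.getD d w (-1) = v := PySem.Dict.getD_of_get?_eq_some _ _ hg
    have hd0 : PySem.Dict.getD d w 0 = v := PySem.Dict.getD_of_get?_eq_some _ _ hg
    have hne : (v == (-1 : Int)) = false := by simp; omega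
    simp only [hd, hd0, hne]
    refine ⟨by norm_num, ?_⟩
    intro k u hk
    rw [if_neg (by simp)] at hk
    rw [PySem.Dict.get?_insert] at hk
    split_ifs at hk with hkw
    · simp_all; omega
    · exact h k u hk

lemma pv_foldl_stepA_eq_stepC :
    ∀ (l : List String) (d : PySem.Dict String Int),
      (∀ k v, d.get? k = some v → 1 ≤ v) → l.foldl pvStepA d = l.foldl pvStepC d := by
  intro l
  induction l with
  | nil => intro d _; rfl
  | cons w t ih =>
      intro d h
      obtain ⟨heq, hinv⟩ := pv_invariant_step d w h
      simp only [List.foldl_cons]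
      rw [ih (pvStepA d w) hinv, heq]

-- ===== VERDICT (by name: the statement is the Claim_ definition above) =====
theorem get_occurance_spec : Claim_equal_get_occurance := by
  intro data _
  unfold Spec_get_occurance get_occurance get_occurance_alt
  have h1 : data.foldl (fun words sent =>
      ((PySem.Str.split? sent " ").getD []).foldl (fun words word =>
        let count := PySem.Dict.getD words word (-1)
        if count == -1 then PySem.Dict.insert words word 1
        else PySem.Dict.insert words word (count + 1)) words)
      PySem.Dict.empty
      = (data.flatMap (fun sent => (PySem.Str.split? sent " ").getD [])).foldl pvStepA PySem.Dict.empty :=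
    pv_foldl_flatMap (fun sent => (PySem.Str.split? sent " ").getD []) pvStepA data PySem.Dict.empty
  rw [h1]
  rw [pv_foldl_stepA_eq_stepC _ PySem.Dict.empty (by intro k v hk; simp [PySem.Dict.get?_empty] at hk)]
  have h2 : (data.flatMap (fun sent => (PySem.Str.split? sent " ").getD [])).foldl pvStepC PySem.Dict.empty
      = PySem.Dict.counter (data.flatMap (fun sent => (PySem.Str.split? sent " ").getD [])) :=
    PySem.Dict.foldl_insert_getD_add_one_eq_counter _
  rw [h2, PySem.Dict.items_counter]
  simp [PySem.List.dedup_eq_ofList]
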